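-- pv_equiv track=rewrite | github.com/AlexandreD-bio/RSV-GenoScan | Script/mutation_detection.py | changement_pipe_en_hashtag
-- ===== SOURCE A (Python) =====
-- def changement_pipe_en_hashtag(sequence_target:str,sequence_query:str,new_sequence:str,sequence_symboles:str,listing_mutation:list,query_number:int) -> tuple[str,list]:
--
--     for z in range(len(sequence_target)):
--
--         if sequence_query[z]!="X":
--             new_sequence = new_sequence + sequence_symboles[z]
--         else:
--             new_sequence += "#"
--
--         if sequence_query[z]!="X" and sequence_target[z] != sequence_query[z] and sequence_query[z] != "-" and sequence_target[z] != "-":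
--             listing_mutation.append(f"{sequence_target[z]}{z+query_number+1}{sequence_query[z]}")
--
--     return new_sequence, listing_mutation
-- ===== SOURCE B (Python) =====
-- def changement_pipe_en_hashtag(sequence_target: str, sequence_query: str, new_sequence: str, sequence_symboles: str, listing_mutation: list, query_number: int) -> tuple[str, list]:
--     # Different strategy: pre-build a padded symbol buffer, overwrite 'X' positions in
--     # place, then join once; mutations come from a zip walk with a running position
--     # counter instead of index arithmetic. listing_mutation is extended in place as in A.
--     n = len(sequence_target)
--     buf = list(sequence_symboles[:n].ljust(n, '#'))
--     for z in range(n):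
--         if sequence_query[z] == 'X':
--             buf[z] = '#'
--     pos = query_number + 1
--     for t, q in zip(sequence_target, sequence_query):
--         if q not in (t, 'X', '-') and t != '-':
--             listing_mutation.append(f"{t}{pos}{q}")
--         pos += 1
--     return new_sequence + ''.join(buf), listing_mutation
-- ===== Notes on version B (the rewrite author's own statement) =====
-- stated objective: alternative
-- what changed: Instead of growing the string character by character inside one fused indexed loop, B slices-and-pads the symbol string into a mutable buffer, overwrites 'X' positions in place and joins once; mutations are collected by walking zip(target, query) with a running position counter instead of computing z+query_number+1 from the loop index.
import Mathlib
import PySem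

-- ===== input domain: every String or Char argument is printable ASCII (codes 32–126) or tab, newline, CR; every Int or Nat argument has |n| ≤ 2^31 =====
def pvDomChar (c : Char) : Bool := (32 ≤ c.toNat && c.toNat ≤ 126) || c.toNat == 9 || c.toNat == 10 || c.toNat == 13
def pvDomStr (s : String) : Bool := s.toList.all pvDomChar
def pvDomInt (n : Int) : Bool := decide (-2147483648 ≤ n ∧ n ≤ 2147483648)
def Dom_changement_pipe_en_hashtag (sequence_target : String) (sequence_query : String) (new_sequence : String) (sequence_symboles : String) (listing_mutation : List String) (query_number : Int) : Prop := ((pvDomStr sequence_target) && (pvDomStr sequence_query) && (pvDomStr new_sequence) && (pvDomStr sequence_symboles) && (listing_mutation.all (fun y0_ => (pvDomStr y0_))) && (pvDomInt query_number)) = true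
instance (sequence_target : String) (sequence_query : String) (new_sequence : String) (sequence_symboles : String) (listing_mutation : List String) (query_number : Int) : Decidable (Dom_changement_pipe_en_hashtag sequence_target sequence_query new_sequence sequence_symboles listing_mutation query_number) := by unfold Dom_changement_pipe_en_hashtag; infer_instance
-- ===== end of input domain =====

-- B builds the annotated string from a padded buffer with in-place overwrites and collects
-- mutations from a zip walk with a running counter; equivalence is about the return value
-- (in Python both versions also extend listing_mutation in place).

-- ===== PORT A =====
-- Mutation label f"{t}{pos}{q}" (both Pythons build the same f-string).
def pvMutLabel (tc : Char) (pos : Int) (qc : Char) : String :=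
  String.mk ([tc] ++ (PySem.Int.toStr pos).toList ++ [qc])

-- Port of A: one fold over range(len(sequence_target)) carrying both accumulators.
def changement_pipe_en_hashtag (sequence_target : String) (sequence_query : String) (new_sequence : String) (sequence_symboles : String) (listing_mutation : List String) (query_number : Int) : String × List String :=
  let tl := sequence_target.toList
  let ql := sequence_query.toList
  let sl := sequence_symboles.toList
  let st := (List.range tl.length).foldl (fun (st : List Char × List String) z =>
    let qc := ql.getD z '?'
    let tc := tl.getD z '?'
    let ns := if qc ≠ 'X' then st.1 ++ [sl.getD z '?'] else st.1 ++ ['#']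
    let lm := if qc ≠ 'X' ∧ tc ≠ qc ∧ qc ≠ '-' ∧ tc ≠ '-' then
                st.2 ++ [pvMutLabel tc ((z : Int) + query_number + 1) qc]
              else st.2
    (ns, lm)) (new_sequence.toList, listing_mutation)
  (String.mk st.1, st.2)

-- ===== PORT B =====
-- Port of B: buf = list(sequence_symboles[:n].ljust(n, '#')) (ljust ported by hand: right-pad
-- with '#'; exact), overwrite 'X' positions in place, join once; then a fold over
-- zip(sequence_target, sequence_query) carrying (listing_mutation, running position).
def changement_pipe_en_hashtag_alt (sequence_target : String) (sequence_query : String) (new_sequence : String) (sequence_symboles : String) (listing_mutation : List String) (query_number : Int) : String × List String :=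
  let tl := sequence_target.toList
  let ql := sequence_query.toList
  let sl := sequence_symboles.toList
  let n := tl.length
  let base := sl.take n ++ List.replicate (n - sl.length) '#'
  let buf := (List.range n).foldl (fun b z => if ql.getD z '?' = 'X' then b.set z '#' else b) base
  let st := (tl.zip ql).foldl (fun (s : List String × Int) p =>
      (if p.2 ≠ p.1 ∧ p.2 ≠ 'X' ∧ p.2 ≠ '-' ∧ p.1 ≠ '-' then
         s.1 ++ [pvMutLabel p.1 s.2 p.2]
       else s.1, s.2 + 1)) (listing_mutation, query_number + 1)
  (String.mk (new_sequence.toList ++ buf), st.1)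

-- ===== PRECONDITION & SPEC =====
-- Pre_ excludes exactly the inputs on which the Python A raises IndexError:
-- an index z < len(sequence_target) with sequence_query[z] missing, or with
-- sequence_query[z] != 'X' and sequence_symboles[z] missing.
def Pre_changement_pipe_en_hashtag (sequence_target : String) (sequence_query : String) (new_sequence : String) (sequence_symboles : String) (listing_mutation : List String) (query_number : Int) : Prop :=
  ∀ z ∈ List.range sequence_target.toList.length,
    z < sequence_query.toList.length ∧
    (sequence_query.toList.getD z '?' = 'X' ∨ z < sequence_symboles.toList.length)
instance (sequence_target : String) (sequence_query : String) (new_sequence : String) (sequence_symboles : String) (listing_mutation : List String) (query_number : Int) : Decidable (Pre_changement_pipe_en_hashtag sequence_target sequence_query new_sequence sequence_symboles listing_mutation query_number) := by unfold Pre_changement_pipe_en_hashtag; infer_instance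
def pvWitness_changement_pipe_en_hashtag : String × String × String × String × List String × Int :=
  ("ACG-", "AXT-", "M:", "||| ", ["G5T"], 3)
def Spec_changement_pipe_en_hashtag (sequence_target : String) (sequence_query : String) (new_sequence : String) (sequence_symboles : String) (listing_mutation : List String) (query_number : Int) (out : String × List String) : Prop := out = changement_pipe_en_hashtag_alt sequence_target sequence_query new_sequence sequence_symboles listing_mutation query_number
instance (sequence_target : String) (sequence_query : String) (new_sequence : String) (sequence_symboles : String) (listing_mutation : List String) (query_number : Int) (out : String × List String) : Decidable (Spec_changement_pipe_en_hashtag sequence_target sequence_query new_sequence sequence_symboles listing_mutation query_number out) := by unfold Spec_changement_pipe_en_hashtag; infer_instance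

-- ===== CLAIM (what is proved, stated in full; the proofs are below) =====
def Claim_equal_changement_pipe_en_hashtag : Prop := ∀ (sequence_target : String) (sequence_query : String) (new_sequence : String) (sequence_symboles : String) (listing_mutation : List String) (query_number : Int), Dom_changement_pipe_en_hashtag sequence_target sequence_query new_sequence sequence_symboles listing_mutation query_number → Pre_changement_pipe_en_hashtag sequence_target sequence_query new_sequence sequence_symboles listing_mutation query_number → Spec_changement_pipe_en_hashtag sequence_target sequence_query new_sequence sequence_symboles listing_mutation query_number (changement_pipe_en_hashtag sequence_target sequence_query new_sequence sequence_symboles listing_mutation query_number)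

-- ===== LEMMAS AND PROOFS =====

-- A's fused fold over range n splits into a map (new characters) and a filterMap (labels).
theorem pv_fold_split (ql tl sl : List Char) (query_number : Int) (n : Nat)
    (ns : List Char) (lm : List String) :
    (List.range n).foldl (fun (st : List Char × List String) z =>
      let qc := ql.getD z '?'
      let tc := tl.getD z '?'
      let ns := if qc ≠ 'X' then st.1 ++ [sl.getD z '?'] else st.1 ++ ['#']
      let lm := if qc ≠ 'X' ∧ tc ≠ qc ∧ qc ≠ '-' ∧ tc ≠ '-' then
                  st.2 ++ [pvMutLabel tc ((z : Int) + query_number + 1) qc]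
                else st.2
      (ns, lm)) (ns, lm)
    = (ns ++ (List.range n).map (fun z => if ql.getD z '?' = 'X' then '#' else sl.getD z '?'),
       lm ++ (List.range n).filterMap (fun z =>
         let qc := ql.getD z '?'
         let tc := tl.getD z '?'
         if qc ≠ 'X' ∧ tc ≠ qc ∧ qc ≠ '-' ∧ tc ≠ '-' then
           some (pvMutLabel tc ((z : Int) + query_number + 1) qc)
         else none)) := by
  induction n with
  | zero => simp
  | succ k ih =>
    rw [List.range_succ, List.foldl_append, ih]
    simp only [List.foldl_cons, List.foldl_nil, List.map_append, List.filterMap_append,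
      List.map_cons, List.map_nil, List.filterMap_cons, List.filterMap_nil]
    by_cases h1 : ql[k]?.getD '?' = 'X' <;>
      simp [h1, List.append_assoc] <;> split_ifs <;> simp [List.append_assoc]

-- Pointwise description of B's overwrite loop.
theorem pv_set_getElem? (idxs : List Nat) (ql : List Char) (base : List Char) (j : Nat) :
    ((idxs.foldl (fun b z => if ql.getD z '?' = 'X' then b.set z '#' else b) base))[j]?
      = if j ∈ idxs ∧ ql.getD j '?' = 'X' then base[j]?.map (fun _ => '#') else base[j]? := by
  induction idxs generalizing base with
  | nil => simp
  | cons z rest ih =>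
    simp only [List.foldl_cons, ih, List.mem_cons]
    by_cases hj : j < base.length
    · rw [List.getElem?_eq_getElem hj]
      by_cases hzj : z = j
      · subst hzj
        simp
        split_ifs <;> simp_all
      · have : (base.set z '#')[j]? = base[j]? := by
          simp [List.getElem?_set, hzj]
        split_ifs <;> simp_all [List.getElem?_eq_getElem hj]
    · have hle : base.length ≤ j := by omega
      have h1 : base[j]? = none := List.getElem?_eq_none hle
      have h2 : ∀ c : Char, (base.set z c)[j]? = none :=
        fun c => List.getElem?_eq_none (by simpa using hle)
      split_ifs <;> simp_all

-- B's zip-with-counter loop equals the appended filterMap over positions.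
theorem pv_zip_counter (ps : List (Char × Char)) (pos : Int) (lm : List String) :
    (ps.foldl (fun (s : List String × Int) p =>
      (if p.2 ≠ p.1 ∧ p.2 ≠ 'X' ∧ p.2 ≠ '-' ∧ p.1 ≠ '-' then
         s.1 ++ [pvMutLabel p.1 s.2 p.2]
       else s.1, s.2 + 1)) (lm, pos)).1
    = lm ++ (List.range ps.length).filterMap (fun k =>
        let t := (ps.getD k ('?', '?')).1
        let q := (ps.getD k ('?', '?')).2
        if q ≠ t ∧ q ≠ 'X' ∧ q ≠ '-' ∧ t ≠ '-' then
          some (pvMutLabel t (pos + (k : Int)) q)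
        else none) := by
  induction ps generalizing pos lm with
  | nil => simp
  | cons hd rest ih =>
    simp only [List.foldl_cons, List.length_cons, List.range_succ_eq_map,
      List.filterMap_cons, List.filterMap_map, ih]
    have harg : ∀ k : Nat, pos + 1 + (k : Int) = pos + ((k : Int) + 1) := by intro k; ring
    by_cases h : hd.2 ≠ hd.1 ∧ hd.2 ≠ 'X' ∧ hd.2 ≠ '-' ∧ hd.1 ≠ '-' <;>
      simp [h, harg, List.append_assoc, Function.comp]

-- ===== VERDICT (by name: the statement is the Claim_ definition above) =====
theorem changement_pipe_en_hashtag_spec : Claim_equal_changement_pipe_en_hashtag := by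
  intro stg sq ns ss lm qn _ hpre
  unfold Spec_changement_pipe_en_hashtag changement_pipe_en_hashtag changement_pipe_en_hashtag_alt
  simp only [Pre_changement_pipe_en_hashtag, List.mem_range] at hpre
  dsimp only
  set tl := stg.toList with htl
  set ql := sq.toList with hql
  set sl := ss.toList with hsl
  set n := tl.length with hn
  have hq : n ≤ ql.length := by
    rcases Nat.eq_zero_or_pos n with h0 | h0
    · omega
    · have := (hpre (n - 1) (by omega)).1
      omega
  have hzl : (tl.zip ql).length = n := by
    simp [List.length_zip]; omega
  have hbuf : (List.range n).foldl (fun b z => if ql.getD z '?' = 'X' then b.set z '#' else b)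
      (List.take n sl ++ List.replicate (n - sl.length) '#')
      = (List.range n).map (fun z => if ql.getD z '?' = 'X' then '#' else sl.getD z '?') := by
    apply List.ext_getElem?
    intro j
    rw [pv_set_getElem?]
    have hbl : (List.take n sl ++ List.replicate (n - sl.length) '#').length = n := by
      simp [List.length_take, List.length_replicate]; omega
    by_cases hj : j < n
    · obtain ⟨hqj, hs⟩ := hpre j hj
      by_cases hx : ql.getD j '?' = 'X'
      · have hx' : ql[j]?.getD '?' = 'X' := hx
        have hb : j < (List.take n sl ++ List.replicate (n - sl.length) '#').length := by omega
        simp [List.mem_range, hj, hx', List.getElem?_eq_getElem hb,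
          List.getElem?_map, List.getElem?_range hj]
      · have hx' : ¬ ql[j]?.getD '?' = 'X' := hx
        have hs' : j < sl.length := hs.resolve_left hx
        have hb : (List.take n sl ++ List.replicate (n - sl.length) '#')[j]? = some (sl[j]'hs') := by
          rw [List.getElem?_append_left (by simp [List.length_take]; omega)]
          simp [List.getElem?_take, hj, List.getElem?_eq_getElem hs']
        simp [hx', hb, List.getElem?_map, List.getElem?_range hj,
          List.getElem?_eq_getElem hs', List.mem_range]
    · have h1 : (List.take n sl ++ List.replicate (n - sl.length) '#')[j]? = none :=
        List.getElem?_eq_none (by omega)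
      have h2 : ((List.range n).map
          (fun z => if ql.getD z '?' = 'X' then '#' else sl.getD z '?'))[j]? = none :=
        List.getElem?_eq_none (by simp; omega)
      simp [h1, h2, List.mem_range]
      omega
  rw [pv_fold_split, pv_zip_counter, hzl, hbuf]
  dsimp only
  refine Prod.ext rfl ?_
  dsimp only
  congr 1
  apply List.filterMap_congr
  intro k hk
  have hk' : k < n := List.mem_range.mp hk
  have hkz : k < (tl.zip ql).length := by omega
  have h1 : (tl.zip ql).getD k ('?', '?') = (tl[k]'hk', ql[k]'(by omega)) := by
    rw [List.getD_eq_getElem _ _ hkz, List.getElem_zip]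
  simp only [h1, List.getD_eq_getElem _ _ hk',
    List.getD_eq_getElem _ _ (show k < ql.length by omega)]
  have hiff : (ql[k]'(by omega) ≠ 'X' ∧ tl[k]'hk' ≠ ql[k]'(by omega) ∧
      ql[k]'(by omega) ≠ '-' ∧ tl[k]'hk' ≠ '-') ↔
      (ql[k]'(by omega) ≠ tl[k]'hk' ∧ ql[k]'(by omega) ≠ 'X' ∧
       ql[k]'(by omega) ≠ '-' ∧ tl[k]'hk' ≠ '-') := by
    constructor <;> intro h <;> exact ⟨by tauto, by tauto, by tauto, by tauto⟩
  have harg : qn + 1 + (k : Int) = (k : Int) + qn + 1 := by ring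
  rw [harg, if_congr hiff rfl rfl]
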